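-- pv_equiv track=rewrite | github.com/SimuladorDeFarm/Trabajo-grafos-2024 | functions/frontend/inicio_destino.py | validar_estacion
-- ===== SOURCE A (Python) =====
-- def validar_estacion(estacion_usr, lista_estaciones):
--
--     existe = False
--
--     n = len(lista_estaciones) -1
--     for i in range(n):
--
--         if estacion_usr == lista_estaciones[i][0]:
--             existe = True
--     for j in range(n):
--
--         if estacion_usr == lista_estaciones[j][1]:
--             existe = True
--
--
--     return existe
-- ===== SOURCE B (Python) =====
-- def validar_estacion(estacion_usr, lista_estaciones):
--     return any(estacion_usr == a or estacion_usr == b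
--                for a, b in lista_estaciones[:-1])
-- ===== Notes on version B (the rewrite author's own statement) =====
-- stated objective: simpler
-- what changed: Replaces the two separate index-based loops with flag mutation by a single any() pass over the sliced list, testing both fields of each row at once (the slice preserves A's skipping of the last row).
import Mathlib
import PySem

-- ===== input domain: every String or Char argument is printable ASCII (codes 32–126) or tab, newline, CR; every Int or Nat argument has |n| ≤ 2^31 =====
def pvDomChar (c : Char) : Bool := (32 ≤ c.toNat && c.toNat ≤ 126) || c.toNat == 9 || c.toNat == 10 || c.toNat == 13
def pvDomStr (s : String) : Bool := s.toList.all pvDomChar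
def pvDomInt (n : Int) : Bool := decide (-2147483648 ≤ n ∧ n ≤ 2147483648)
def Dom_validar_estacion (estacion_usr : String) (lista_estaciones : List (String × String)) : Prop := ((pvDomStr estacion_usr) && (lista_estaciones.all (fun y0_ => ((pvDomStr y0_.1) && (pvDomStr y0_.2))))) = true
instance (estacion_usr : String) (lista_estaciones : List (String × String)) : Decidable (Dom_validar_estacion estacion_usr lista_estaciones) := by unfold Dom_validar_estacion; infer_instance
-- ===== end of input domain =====

-- B replaces A's two index loops over range(len-1) with a single any() pass over the
-- list sliced by [:-1], testing both fields per row (simpler; same behaviour).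

-- ===== PORT A =====
def validar_estacion (estacion_usr : String) (lista_estaciones : List (String × String)) : Bool :=
  let existe := false
  let n : Int := (lista_estaciones.length : Int) - 1
  let existe := (PySem.List.pyRange 0 n).foldl
    (fun acc i => if estacion_usr == (PySem.List.pyGetD lista_estaciones i ("", "")).1 then true else acc) existe
  let existe := (PySem.List.pyRange 0 n).foldl
    (fun acc j => if estacion_usr == (PySem.List.pyGetD lista_estaciones j ("", "")).2 then true else acc) existe
  existe

-- ===== PORT B =====
def validar_estacion_alt (estacion_usr : String) (lista_estaciones : List (String × String)) : Bool :=
  (PySem.List.slice lista_estaciones none (some (-1))).any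
    (fun row => estacion_usr == row.1 || estacion_usr == row.2)

-- ===== PRECONDITION & SPEC =====
def Spec_validar_estacion (estacion_usr : String) (lista_estaciones : List (String × String)) (out : Bool) : Prop := out = validar_estacion_alt estacion_usr lista_estaciones
instance (estacion_usr : String) (lista_estaciones : List (String × String)) (out : Bool) : Decidable (Spec_validar_estacion estacion_usr lista_estaciones out) := by unfold Spec_validar_estacion; infer_instance

-- ===== CLAIM (what is proved, stated in full; the proofs are below) =====
def Claim_equal_validar_estacion : Prop := ∀ (estacion_usr : String) (lista_estaciones : List (String × String)), Dom_validar_estacion estacion_usr lista_estaciones → Spec_validar_estacion estacion_usr lista_estaciones (validar_estacion estacion_usr lista_estaciones)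

-- ===== LEMMAS AND PROOFS =====

-- A's flag loop is an 'any' over the index list.
theorem foldl_if_true_eq_or_any (l : List Int) (p : Int → Bool) (b : Bool) :
    l.foldl (fun acc i => if p i then true else acc) b = (b || l.any p) := by
  induction l generalizing b with
  | nil => simp
  | cons x xs ih =>
    simp only [List.foldl_cons, List.any_cons, ih]
    by_cases h : p x <;> simp [h]

-- an 'any' over the first m indices is an 'any' over the first m elements
theorem any_range_getD {α : Type} (xs : List α) (d : α) (p : α → Bool) (m : Nat)
    (h : m ≤ xs.length) :
    (List.range m).any (fun i => p (xs.getD i d)) = (xs.take m).any p := by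
  induction m with
  | zero => simp
  | succ k ih =>
    rw [List.range_succ, List.take_add_one]
    simp only [List.any_append, ih (Nat.le_of_succ_le h)]
    have hk : k < xs.length := h
    simp [List.getD, List.getElem?_eq_getElem hk, List.any_cons]

theorem any_or_split {α : Type} (l : List α) (p q : α → Bool) :
    l.any (fun x => p x || q x) = (l.any p || l.any q) := by
  induction l with
  | nil => simp
  | cons x xs ih =>
    simp only [List.any_cons, ih]
    by_cases hp : p x <;> by_cases hq : q x <;> simp [hp, hq]

-- ===== VERDICT (by name: the statement is the Claim_ definition above) =====
theorem validar_estacion_spec : Claim_equal_validar_estacion := by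
  intro e xs _
  unfold Spec_validar_estacion validar_estacion validar_estacion_alt
  rw [PySem.List.slice_to_neg_one]
  cases xs with
  | nil =>
    simp
  | cons h t =>
    have hn : ((((h :: t).length : Nat) : Int) - 1) = ((t.length : Nat) : Int) := by
      push_cast; simp
    rw [hn]
    simp only [PySem.List.pyRange_zero_natCast, foldl_if_true_eq_or_any, List.any_map,
      Function.comp_def, PySem.List.pyGetD_natCast]
    have hle : t.length ≤ (h :: t).length := by simp
    rw [any_range_getD (h :: t) ("", "") (fun r => e == r.1) t.length hle,
        any_range_getD (h :: t) ("", "") (fun r => e == r.2) t.length hle]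
    rw [List.dropLast_eq_take]
    simp only [List.length_cons, Nat.add_sub_cancel]
    rw [any_or_split]
    simp [Bool.or_comm]
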